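-- pv_equiv track=rewrite | github.com/nabirakhan/aibuster | ai.py | _chain_depth_variations
-- ===== SOURCE A (Python) =====
-- from typing import List, Dict, Set, Optional, Tuple
--
-- def _chain_depth_variations(path: str) -> Set[str]:
--     """Generate depth variations of discovered paths"""
--     paths = set()
--     parts = path.rstrip('/').split('/')
--
--     for i in range(1, len(parts)):
--         partial = '/'.join(parts[:i+1])
--         paths.add(partial)
--         paths.add(f"{partial}/")
--
--     return paths
-- ===== SOURCE B (Python) =====
-- def _chain_depth_variations(path: str):
--     """Generate depth variations of discovered paths.
--
--     Single incremental pass: maintain a running prefix instead of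
--     re-joining the growing slice at every depth."""
--     parts = path.rstrip('/').split('/')
--     first, rest = parts[0], parts[1:]
--     prefixes = []
--     prefix = first
--     for part in rest:
--         prefix = prefix + '/' + part
--         prefixes.append(prefix)
--     return {v for p in prefixes for v in (p, p + '/')}
-- ===== Notes on version B (the rewrite author's own statement) =====
-- stated objective: alternative
-- what changed: B replaces A's per-depth re-join of the growing slice parts[:i+1] with a single incremental scan that extends one running prefix and collects all prefixes, then emits each prefix with and without trailing slash.
import Mathlib
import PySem

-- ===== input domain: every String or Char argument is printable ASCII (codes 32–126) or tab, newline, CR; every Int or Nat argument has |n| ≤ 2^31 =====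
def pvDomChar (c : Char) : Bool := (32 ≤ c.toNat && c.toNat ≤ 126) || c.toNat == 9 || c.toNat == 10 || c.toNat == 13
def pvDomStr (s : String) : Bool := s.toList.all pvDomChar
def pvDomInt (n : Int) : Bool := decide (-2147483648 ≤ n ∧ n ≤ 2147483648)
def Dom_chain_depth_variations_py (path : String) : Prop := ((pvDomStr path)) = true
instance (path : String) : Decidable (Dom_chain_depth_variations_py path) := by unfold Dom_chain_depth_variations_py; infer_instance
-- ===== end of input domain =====

-- B replaces A's per-depth re-join of parts[:i+1] with one incremental running-prefix scan.

-- ===== PORT A =====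
-- path.rstrip('/').split('/'): rstrip('/') is ported by hand (drop trailing '/' chars — exact
-- for the single strip character); split? with separator "/" is always `some`.
def pvParts (path : String) : List String :=
  (PySem.Str.split? (String.ofList ((path.toList.reverse.dropWhile (· == '/')).reverse)) "/").getD []

-- f"{partial}/" : appending the single char '/' (exact)
def pvAddSlash (s : String) : String := String.ofList (s.toList ++ ['/'])

def chain_depth_variations_py (path : String) : List String :=
  let parts := pvParts path
  (PySem.List.pyRange 1 (parts.length : Int) 1).foldl
    (fun paths i =>
      let prt := PySem.Str.join "/" (PySem.List.slice parts none (some (i+1)))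
      PySem.Set.add (PySem.Set.add paths prt) (pvAddSlash prt))
    PySem.Set.empty

-- ===== PORT B =====
-- prefix + '/' + part  (exact single-char-separator concatenation)
def pvCat (a b : String) : String := String.ofList (a.toList ++ '/' :: b.toList)

def chain_depth_variations_py_alt (path : String) : List String :=
  match pvParts path with
  | [] => []   -- unreachable: str.split('/') never returns an empty list
  | first :: rest =>
    let prefixes := (rest.foldl (fun (st : List String × String) part =>
        let pre := pvCat st.2 part
        (st.1 ++ [pre], pre)) (([] : List String), first)).1
    prefixes.foldl (fun s p => PySem.Set.add (PySem.Set.add s p) (pvAddSlash p)) PySem.Set.empty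

-- ===== PRECONDITION & SPEC =====
def Spec_chain_depth_variations_py (path : String) (out : List String) : Prop := out = chain_depth_variations_py_alt path
instance (path : String) (out : List String) : Decidable (Spec_chain_depth_variations_py path out) := by unfold Spec_chain_depth_variations_py; infer_instance

-- ===== CLAIM (what is proved, stated in full; the proofs are below) =====
def Claim_equal_chain_depth_variations_py : Prop := ∀ (path : String), Dom_chain_depth_variations_py path → Spec_chain_depth_variations_py path (chain_depth_variations_py path)

-- ===== LEMMAS AND PROOFS =====

-- the list of running prefixes B builds: p0/r1, p0/r1/r2, …
def pvPrefList (p0 : String) : List String → List String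
  | [] => []
  | r :: rs => pvCat p0 r :: pvPrefList (pvCat p0 r) rs

theorem pvScan_eq (rest : List String) (p0 : String) (acc : List String) :
    (rest.foldl (fun (st : List String × String) part =>
        let pre := pvCat st.2 part
        (st.1 ++ [pre], pre)) (acc, p0)).1 = acc ++ pvPrefList p0 rest := by
  induction rest generalizing p0 acc with
  | nil => simp [pvPrefList]
  | cons r rs ih => simp [pvPrefList, ih]

theorem pvJoin_cat (a b : String) (l : List String) :
    PySem.Str.join "/" (pvCat a b :: l) = PySem.Str.join "/" (a :: b :: l) := by
  apply String.toList_inj.mp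
  cases l with
  | nil =>
    simp [PySem.Str.toList_join, PySem.Chars.join_singleton, PySem.Chars.join_cons_cons, pvCat]
  | cons z zs =>
    simp [PySem.Str.toList_join, PySem.Chars.join_cons_cons, pvCat]

theorem pvMap_join_take (rest : List String) (p0 : String) :
    (List.range rest.length).map
      (fun k => PySem.Str.join "/" ((p0 :: rest).take (k+2))) = pvPrefList p0 rest := by
  induction rest generalizing p0 with
  | nil => simp [pvPrefList]
  | cons r rs ih =>
    rw [pvPrefList, List.length_cons, List.range_succ_eq_map]
    simp only [List.map_cons, List.map_map]
    congr 1
    · have : PySem.Str.join "/" [p0, r] = pvCat p0 r := by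
        apply String.toList_inj.mp
        simp [PySem.Str.toList_join, PySem.Chars.join_singleton, PySem.Chars.join_cons_cons, pvCat]
      simpa using this
    · rw [← ih (pvCat p0 r)]
      apply List.map_congr_left
      intro k _
      simp only [Function.comp]
      rw [show ∀ m : Nat, (p0 :: r :: rs).take (m+2+1) = p0 :: r :: rs.take (m+1) from fun m => rfl]
      rw [show ∀ m : Nat, (pvCat p0 r :: rs).take (m+2) = pvCat p0 r :: rs.take (m+1) from fun m => rfl]
      rw [pvJoin_cat]

theorem pvMain (p0 : String) (rest : List String) :
    (PySem.List.pyRange 1 (((p0 :: rest).length : Int)) 1).foldl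
      (fun paths i =>
        let prt := PySem.Str.join "/" (PySem.List.slice (p0 :: rest) none (some (i+1)))
        PySem.Set.add (PySem.Set.add paths prt) (pvAddSlash prt))
      PySem.Set.empty
    = (pvPrefList p0 rest).foldl
        (fun s p => PySem.Set.add (PySem.Set.add s p) (pvAddSlash p)) PySem.Set.empty := by
  rw [PySem.List.pyRange_one]
  have hn : (((p0 :: rest).length : Int) - 1).toNat = rest.length := by simp
  rw [hn, List.foldl_map]
  rw [← pvMap_join_take rest p0, List.foldl_map]
  apply PySem.List.foldl_congr_mem
  intro acc k hk
  have h1 : ((1 : Int) + k) + 1 = ((k + 2 : Nat) : Int) := by push_cast; ring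
  rw [h1, PySem.List.slice_to_natCast]

theorem chain_depth_variations_py_eq (path : String) :
    chain_depth_variations_py path = chain_depth_variations_py_alt path := by
  unfold chain_depth_variations_py chain_depth_variations_py_alt
  cases h : pvParts path with
  | nil => simp [PySem.List.pyRange_one_eq_nil, PySem.Set.empty]
  | cons first rest => simp only [pvScan_eq, List.nil_append, pvMain]

-- ===== VERDICT (by name: the statement is the Claim_ definition above) =====
theorem chain_depth_variations_py_spec : Claim_equal_chain_depth_variations_py := by
  intro path _
  exact chain_depth_variations_py_eq path
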